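-- pv_equiv track=rewrite | github.com/Kyoto-01/testbed-tsch-data-analysis-API | src/lib/testbed_analysis/utils/list_utils.py | get_first_occurrences
-- ===== SOURCE A (Python) =====
-- def get_first_occurrences(
--     l: 'Union[list, tuple]'
-- ) -> 'list[tuple[int, Any]]':
--     '''
--         Note: repetitions must be sequential (that's
--         why it is recommended that the input list
--         be sorted)
--     '''
--
--     ret = []
--
--     last = None
--     for i, v in enumerate(l):
--         if v != last or i == 0:
--             last = v
--             ret.append((i, v))
--
--     return ret
-- ===== SOURCE B (Python) =====
-- def get_first_occurrences(l):
--     '''Divide and conquer: solve each half independently, then join the two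
--     answers, dropping the head of the right answer when its first run
--     continues the last run of the left half.'''
--     seq = list(l)
--
--     def rec(seg, off):
--         if len(seg) <= 1:
--             return [(off, seg[0])] if seg else []
--         m = len(seg) // 2
--         left = rec(seg[:m], off)
--         right = rec(seg[m:], off + m)
--         if seg[m] != seg[m - 1]:
--             return left + right
--         return left + right[1:]
--
--     return rec(seq, 0)
-- ===== Notes on version B (the rewrite author's own statement) =====
-- stated objective: alternative
-- what changed: Replaces A's single left-to-right pass with last-value tracking by a divide-and-conquer recursion: solve each half of the list independently and merge the two answers, dropping the right half's first entry when its run continues the left half's last run.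
import Mathlib
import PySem

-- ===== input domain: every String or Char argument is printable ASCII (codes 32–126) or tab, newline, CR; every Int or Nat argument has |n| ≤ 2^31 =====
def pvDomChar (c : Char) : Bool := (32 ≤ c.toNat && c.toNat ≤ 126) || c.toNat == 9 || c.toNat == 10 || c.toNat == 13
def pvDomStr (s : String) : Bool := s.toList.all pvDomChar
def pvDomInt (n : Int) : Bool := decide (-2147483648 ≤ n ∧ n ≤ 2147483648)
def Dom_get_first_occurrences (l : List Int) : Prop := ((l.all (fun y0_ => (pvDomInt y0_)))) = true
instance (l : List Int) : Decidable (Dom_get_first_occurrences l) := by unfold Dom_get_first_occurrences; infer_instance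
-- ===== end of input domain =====

-- B replaces A's single pass with last-value tracking by a divide-and-conquer recursion
-- that solves each half and merges the answers; objective: alternative, same result.

-- ===== PORT A =====
-- enumerate(l) with Python int indices
def pvEnumFrom (i : Int) : List Int → List (Int × Int)
  | [] => []
  | x :: xs => (i, x) :: pvEnumFrom (i + 1) xs

-- literal port of A: fold over enumerate(l) carrying (last, ret); last starts as None
def get_first_occurrences (l : List Int) : List (Int × Int) :=
  ((pvEnumFrom 0 l).foldl
    (fun (st : Option Int × List (Int × Int)) iv =>
      if some iv.2 ≠ st.1 ∨ iv.1 = 0 then (some iv.2, st.2 ++ [(iv.1, iv.2)]) else st)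
    (none, [])).2

-- ===== PORT B =====
-- rec(seg, off): seg[:m] = take m, seg[m:] = drop m (0 ≤ m ≤ len, exact);
-- seg[m], seg[m-1] via pyGet? (both in range here, so `some _ ≠ some _` is Python's `!=`);
-- right[1:] = tail.
def pvRec (seg : List Int) (off : Int) : List (Int × Int) :=
  if _h : seg.length ≤ 1 then
    match seg with
    | [] => []
    | x :: _ => [(off, x)]
  else
    let m := seg.length / 2
    let left := pvRec (seg.take m) off
    let right := pvRec (seg.drop m) (off + (m : Int))
    if PySem.List.pyGet? seg (m : Int) ≠ PySem.List.pyGet? seg ((m : Int) - 1) then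
      left ++ right
    else
      left ++ right.tail
termination_by seg.length
decreasing_by
  · have h1 : seg.length / 2 < seg.length := Nat.div_lt_self (by omega) (by omega)
    simp only [List.length_take]; omega
  · have h1 : 1 ≤ seg.length / 2 := by omega
    simp only [List.length_drop]; omega

def get_first_occurrences_alt (l : List Int) : List (Int × Int) := pvRec l 0

-- ===== PRECONDITION & SPEC =====
def Spec_get_first_occurrences (l : List Int) (out : List (Int × Int)) : Prop := out = get_first_occurrences_alt l
instance (l : List Int) (out : List (Int × Int)) : Decidable (Spec_get_first_occurrences l out) := by unfold Spec_get_first_occurrences; infer_instance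

-- ===== CLAIM (what is proved, stated in full; the proofs are below) =====
def Claim_equal_get_first_occurrences : Prop := ∀ (l : List Int), Dom_get_first_occurrences l → Spec_get_first_occurrences l (get_first_occurrences l)

-- ===== LEMMAS AND PROOFS =====

-- canonical description of the answer: pvScan emits (i,x) at every change of value
def pvScan (prev i : Int) : List Int → List (Int × Int)
  | [] => []
  | x :: xs => if x = prev then pvScan x (i + 1) xs else (i, x) :: pvScan x (i + 1) xs

def pvFirsts (off : Int) : List Int → List (Int × Int)
  | [] => []
  | x :: xs => (off, x) :: pvScan x (off + 1) xs

-- A's loop rewritten as structural recursion emitting its appended items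
def pvLoopA (last : Option Int) : List (Int × Int) → List (Int × Int)
  | [] => []
  | (i, v) :: rest =>
    if some v ≠ last ∨ i = 0 then (i, v) :: pvLoopA (some v) rest else pvLoopA last rest

theorem pvFoldA_eq_loopA (ps : List (Int × Int)) :
    ∀ (last : Option Int) (acc : List (Int × Int)),
      (ps.foldl
        (fun (st : Option Int × List (Int × Int)) iv =>
          if some iv.2 ≠ st.1 ∨ iv.1 = 0 then (some iv.2, st.2 ++ [(iv.1, iv.2)]) else st)
        (last, acc)).2 = acc ++ pvLoopA last ps := by
  induction ps with
  | nil => simp [pvLoopA]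
  | cons p rest ih =>
    intro last acc
    obtain ⟨i, v⟩ := p
    simp only [List.foldl, pvLoopA]
    by_cases h : some v ≠ last ∨ i = 0
    · simp [h, ih]
    · simp [h, ih]

theorem pvLoopA_eq_scan (xs : List Int) :
    ∀ (v k : Int), 1 ≤ k → pvLoopA (some v) (pvEnumFrom k xs) = pvScan v k xs := by
  induction xs with
  | nil => intro v k _; simp [pvEnumFrom, pvLoopA, pvScan]
  | cons x xs ih =>
    intro v k hk
    simp only [pvEnumFrom, pvLoopA, pvScan]
    by_cases hx : x = v
    · subst hx
      rw [if_neg (by simp; omega), if_pos rfl, ih x (k + 1) (by omega)]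
    · rw [if_pos (Or.inl (by simpa using hx)), if_neg hx, ih x (k + 1) (by omega)]

theorem pvA_eq_firsts (l : List Int) : get_first_occurrences l = pvFirsts 0 l := by
  unfold get_first_occurrences
  rw [pvFoldA_eq_loopA]
  cases l with
  | nil => simp [pvEnumFrom, pvLoopA, pvFirsts]
  | cons x xs =>
    simp only [pvEnumFrom, pvLoopA, pvFirsts, List.nil_append]
    rw [if_pos (by simp)]
    rw [pvLoopA_eq_scan xs x (0 + 1) (by norm_num)]

theorem pvScan_append (u : List Int) :
    ∀ (w : List Int) (p i : Int),
      pvScan p i (u ++ w) = pvScan p i u ++ pvScan (u.getLastD p) (i + u.length) w := by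
  induction u with
  | nil => intro w p i; simp [pvScan]
  | cons x us ih =>
    intro w p i
    simp only [List.cons_append, pvScan, List.getLastD_cons, List.length_cons]
    rw [ih w x (i + 1)]
    have harith : i + 1 + (us.length : Int) = i + ((us.length : Int) + 1) := by ring
    push_cast
    rw [harith]
    split <;> simp

theorem pvFirsts_append (x : Int) (us w : List Int) (off : Int) :
    pvFirsts off ((x :: us) ++ w)
      = pvFirsts off (x :: us) ++ pvScan ((x :: us).getLastD 0) (off + (x :: us).length) w := by
  simp only [List.cons_append, pvFirsts, List.getLastD_cons, List.length_cons]
  rw [pvScan_append us w x (off + 1)]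
  have harith : off + 1 + (us.length : Int) = off + ((us.length : Int) + 1) := by ring
  push_cast
  rw [harith]

theorem pvScan_head (p i y : Int) (ys : List Int) :
    pvScan p i (y :: ys) = if y = p then (pvFirsts i (y :: ys)).tail else pvFirsts i (y :: ys) := by
  simp only [pvScan, pvFirsts]
  split_ifs <;> rfl

theorem pvGetAtSplitLast (x : Int) (us w : List Int) :
    PySem.List.pyGet? ((x :: us) ++ w) (((x :: us).length : Int) - 1) = some ((x :: us).getLastD 0) := by
  have h1 : (((x :: us).length : Int) - 1) = ((us.length : Nat) : Int) := by simp
  rw [h1, PySem.List.pyGet?_natCast]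
  rw [List.getElem?_append_left (by simp)]
  rw [List.getElem?_eq_getElem (by simp)]
  congr 1
  rw [List.getLastD_eq_getLast?, List.getLast?_eq_getElem?, List.getElem?_eq_getElem (by simp)]
  simp
  rfl

theorem pvGetAtSplitHead (x : Int) (us w : List Int) :
    PySem.List.pyGet? ((x :: us) ++ w) ((x :: us).length : Int) = w[0]? := by
  rw [PySem.List.pyGet?_natCast, List.getElem?_append_right (by simp)]
  simp

theorem pvRec_eq_firsts : ∀ (n : Nat) (seg : List Int) (off : Int),
    seg.length ≤ n → pvRec seg off = pvFirsts off seg := by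
  intro n
  induction n with
  | zero =>
    intro seg off h
    have hnil : seg = [] := by cases seg <;> simp_all
    subst hnil
    simp [pvRec, pvFirsts]
  | succ n ih =>
    intro seg off hlen
    by_cases h1 : seg.length ≤ 1
    · rw [pvRec, dif_pos h1]
      match seg, h1 with
      | [], _ => simp [pvFirsts]
      | [x], _ => simp [pvFirsts, pvScan]
    · rw [pvRec, dif_neg h1]
      have h2 : 2 ≤ seg.length := by omega
      have hm1 : 1 ≤ seg.length / 2 := by omega
      have hmlt : seg.length / 2 < seg.length := Nat.div_lt_self (by omega) (by omega)
      have hL : pvRec (seg.take (seg.length / 2)) off = pvFirsts off (seg.take (seg.length / 2)) :=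
        ih (seg.take (seg.length / 2)) off
          (by rw [List.length_take, Nat.min_eq_left (le_of_lt hmlt)]; omega)
      have hR : pvRec (seg.drop (seg.length / 2)) (off + ((seg.length / 2 : Nat) : Int))
          = pvFirsts (off + ((seg.length / 2 : Nat) : Int)) (seg.drop (seg.length / 2)) :=
        ih (seg.drop (seg.length / 2)) (off + ((seg.length / 2 : Nat) : Int))
          (by rw [List.length_drop]; omega)
      obtain ⟨x, us, hu⟩ : ∃ x us, seg.take (seg.length / 2) = x :: us := by
        cases htk : seg.take (seg.length / 2) with
        | nil =>
          exfalso
          have h0 := congrArg List.length htk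
          rw [List.length_take, Nat.min_eq_left (le_of_lt hmlt)] at h0
          simp only [List.length_nil] at h0
          omega
        | cons a b => exact ⟨a, b, rfl⟩
      obtain ⟨y, ys, hw⟩ : ∃ y ys, seg.drop (seg.length / 2) = y :: ys := by
        cases hdr : seg.drop (seg.length / 2) with
        | nil =>
          exfalso
          have h0 := congrArg List.length hdr
          rw [List.length_drop] at h0
          simp only [List.length_nil] at h0
          omega
        | cons a b => exact ⟨a, b, rfl⟩
      have hlenu : (x :: us).length = seg.length / 2 := by
        have h := congrArg List.length hu
        rw [List.length_take, Nat.min_eq_left (le_of_lt hmlt)] at h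
        exact h.symm
      have hsplit : seg = (x :: us) ++ (y :: ys) := by
        rw [← hu, ← hw]; exact (List.take_append_drop _ seg).symm
      have hg1 : PySem.List.pyGet? seg ((seg.length / 2 : Nat) : Int) = some y := by
        rw [show (((seg.length / 2 : Nat)) : Int) = ((x :: us).length : Int) by exact_mod_cast hlenu.symm]
        rw [hsplit, pvGetAtSplitHead]
        rfl
      have hg2 : PySem.List.pyGet? seg (((seg.length / 2 : Nat) : Int) - 1)
          = some ((x :: us).getLastD 0) := by
        rw [show (((seg.length / 2 : Nat)) : Int) = ((x :: us).length : Int) by exact_mod_cast hlenu.symm]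
        rw [hsplit]
        exact pvGetAtSplitLast x us (y :: ys)
      simp only []
      rw [hg1, hg2, hL, hR, hw, hu]
      conv_rhs => rw [hsplit, pvFirsts_append]
      rw [pvScan_head]
      rw [show (off + ((x :: us).length : Int)) = off + ((seg.length / 2 : Nat) : Int) by rw [hlenu]]
      by_cases hcase : y = (x :: us).getLastD 0
      · rw [if_neg (by simp [hcase]), if_pos hcase]
      · rw [if_pos (by simpa using hcase), if_neg hcase]

-- ===== VERDICT (by name: the statement is the Claim_ definition above) =====
theorem get_first_occurrences_spec : Claim_equal_get_first_occurrences := by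
  intro l _
  show get_first_occurrences l = get_first_occurrences_alt l
  rw [pvA_eq_firsts, get_first_occurrences_alt, pvRec_eq_firsts l.length l 0 le_rfl]
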